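-- pv_equiv track=rewrite | github.com/pythonarcade/arcade | arcade/examples/mountains_midpoint_displacement.py | fix_points
-- ===== SOURCE A (Python) =====
-- SCREEN_WIDTH = 1200
--
-- def fix_points(points):
--     last_y = None
--     last_x = None
--     new_list = []
--     for point in points:
--         x = int(point[0])
--         y = int(point[1])
--
--         if last_y is None or y != last_y:
--             if last_y is None:
--                 last_x = x
--                 last_y = y
--
--             x1 = last_x
--             x2 = x
--             y1 = last_y
--             y2 = y
--
--             new_list.append((x1, 0))
--             new_list.append((x1, y1))
--             new_list.append((x2, y2))
--             new_list.append((x2, 0))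
--
--             last_x = x
--             last_y = y
--
--     x1 = last_x
--     x2 = SCREEN_WIDTH
--     y1 = last_y
--     y2 = last_y
--
--     new_list.append((x1, 0))
--     new_list.append((x1, y1))
--     new_list.append((x2, y2))
--     new_list.append((x2, 0))
--
--     return new_list
-- ===== SOURCE B (Python) =====
-- SCREEN_WIDTH = 1200
--
-- def fix_points(points):
--     # Pass 1: keep the corner points (first point, then every point whose y
--     # differs from the previously kept y).
--     corners = []
--     for p in points:
--         x, y = int(p[0]), int(p[1])
--         if not corners or y != corners[-1][1]:
--             corners.append((x, y))
--     if not corners: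
--         return []
--     # Pass 2: emit one quad per corner (degenerate for the first), then close.
--     out = []
--     px, py = corners[0]
--     for (x, y) in corners:
--         out += [(px, 0), (px, py), (x, y), (x, 0)]
--         px, py = x, y
--     out += [(px, 0), (px, py), (SCREEN_WIDTH, py), (SCREEN_WIDTH, 0)]
--     return out
-- ===== Notes on version B (the rewrite author's own statement) =====
-- stated objective: alternative
-- what changed: Single stateful filter-and-emit loop replaced by two passes: first build the list of kept corner points, then emit the quads pairwise from consecutive corners plus the closing quad.
-- outside the precondition, e.g. on fix_points([]): A returns [(None, 0), (None, None), (1200, None), (1200, 0)], B returns []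
import Mathlib
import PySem

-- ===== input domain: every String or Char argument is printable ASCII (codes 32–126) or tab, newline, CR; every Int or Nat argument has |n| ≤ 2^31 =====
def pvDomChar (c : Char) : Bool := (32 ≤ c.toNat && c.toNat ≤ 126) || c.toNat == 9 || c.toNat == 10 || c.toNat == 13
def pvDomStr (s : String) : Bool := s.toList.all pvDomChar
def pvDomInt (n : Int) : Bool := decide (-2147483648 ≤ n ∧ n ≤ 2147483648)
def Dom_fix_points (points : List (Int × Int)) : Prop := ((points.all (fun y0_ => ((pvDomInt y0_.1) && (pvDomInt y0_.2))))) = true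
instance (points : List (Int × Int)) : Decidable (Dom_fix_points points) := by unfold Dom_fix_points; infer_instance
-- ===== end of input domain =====

-- B: two passes (build the kept-corner list, then emit quads pairwise from consecutive
-- corners) instead of A's single stateful filter-and-emit loop; alternative decomposition,
-- same cost. Equivalence is claimed on non-empty inputs (see Pre_).

-- ===== PORT A =====
-- one loop iteration of A (state: last_y?, last_x?, new_list)
def fixStepA (st : Option Int × Option Int × List (Int × Int)) (point : Int × Int) :
    Option Int × Option Int × List (Int × Int) :=
  let lastY := st.1
  let lastX := st.2.1
  let nl := st.2.2
  let x := point.1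
  let y := point.2
  if lastY = none ∨ lastY ≠ some y then
    let lastX := if lastY = none then some x else lastX
    let lastY := if lastY = none then some y else lastY
    let x1 := lastX.getD x   -- lastX is `some` on this branch; default never used
    let y1 := lastY.getD y
    (some y, some x, nl ++ [(x1, 0), (x1, y1), (x, y), (x, 0)])
  else st

def fix_points (points : List (Int × Int)) : List (Int × Int) :=
  let st := points.foldl fixStepA (none, none, [])
  -- the trailing block; on empty input Python would put None here, excluded by Pre_
  let x1 := st.2.1.getD 0
  let y1 := st.1.getD 0
  st.2.2 ++ [(x1, 0), (x1, y1), (1200, y1), (1200, 0)]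

-- ===== PORT B =====
-- pass 1 step: keep a point iff it is the first or its y differs from the last kept y
def cornerStep (cs : List (Int × Int)) (p : Int × Int) : List (Int × Int) :=
  if cs.getLast?.map Prod.snd ≠ some p.2 then cs ++ [(p.1, p.2)] else cs

-- pass 2 step: emit one quad from the previous corner (px,py) to the current corner c
def quadStep (st : Int × Int × List (Int × Int)) (c : Int × Int) :
    Int × Int × List (Int × Int) :=
  (c.1, c.2, st.2.2 ++ [(st.1, 0), (st.1, st.2.1), (c.1, c.2), (c.1, 0)])

def fix_points_alt (points : List (Int × Int)) : List (Int × Int) :=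
  let cs := points.foldl cornerStep []
  match cs with
  | [] => []
  | c0 :: _ =>
    let st := cs.foldl quadStep (c0.1, c0.2, [])
    st.2.2 ++ [(st.1, 0), (st.1, st.2.1), (1200, st.2.1), (1200, 0)]

-- ===== PRECONDITION & SPEC =====
-- Pre_ excludes only the empty list, on which A returns tuples containing None
-- (not values of the declared int type).
def Pre_fix_points (points : List (Int × Int)) : Prop := points ≠ []
instance (points : List (Int × Int)) : Decidable (Pre_fix_points points) := by
  unfold Pre_fix_points; infer_instance

def pvWitness_fix_points : (List (Int × Int)) := [(100, 50), (200, 50), (300, 80)]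

def Spec_fix_points (points : List (Int × Int)) (out : List (Int × Int)) : Prop := out = fix_points_alt points
instance (points : List (Int × Int)) (out : List (Int × Int)) : Decidable (Spec_fix_points points out) := by unfold Spec_fix_points; infer_instance

-- ===== CLAIM (what is proved, stated in full; the proofs are below) =====
def Claim_equal_fix_points : Prop := ∀ (points : List (Int × Int)), Dom_fix_points points → Pre_fix_points points → Spec_fix_points points (fix_points points)

-- ===== LEMMAS AND PROOFS =====

-- common semantics of the tail of both loops: remaining points, last kept corner (lx,ly)
def emit : List (Int × Int) → Int → Int → List (Int × Int)
  | [], lx, ly => [(lx, 0), (lx, ly), (1200, ly), (1200, 0)]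
  | p :: ps, lx, ly =>
    if p.2 ≠ ly then
      [(lx, 0), (lx, ly), (p.1, p.2), (p.1, 0)] ++ emit ps p.1 p.2
    else emit ps lx ly

-- B's second pass plus the closing quad, as a function of the corner list
def pass2 (cs : List (Int × Int)) : List (Int × Int) :=
  match cs with
  | [] => []
  | c0 :: _ =>
    let st := cs.foldl quadStep (c0.1, c0.2, [])
    st.2.2 ++ [(st.1, 0), (st.1, st.2.1), (1200, st.2.1), (1200, 0)]

lemma alt_eq (points : List (Int × Int)) :
    fix_points_alt points = pass2 (points.foldl cornerStep []) := rfl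

-- A's loop, started after at least one kept point, computes `emit`
lemma A_loop (ps : List (Int × Int)) : ∀ (lx ly : Int) (acc : List (Int × Int)),
    (let st := ps.foldl fixStepA (some ly, some lx, acc)
     st.2.2 ++ [(st.2.1.getD 0, 0), (st.2.1.getD 0, st.1.getD 0),
                (1200, st.1.getD 0), (1200, 0)])
    = acc ++ emit ps lx ly := by
  induction ps with
  | nil => intro lx ly acc; simp [emit]
  | cons p ps ih =>
    intro lx ly acc
    by_cases h : p.2 = ly
    · have hstep : fixStepA (some ly, some lx, acc) p = (some ly, some lx, acc) := by
        simp [fixStepA, h]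
      simp only [List.foldl_cons, hstep]
      rw [ih lx ly acc]
      simp [emit, h]
    · have h2 : (some ly : Option Int) ≠ some p.2 := by simpa using Ne.symm h
      have hstep : fixStepA (some ly, some lx, acc) p
          = (some p.2, some p.1, acc ++ [(lx, 0), (lx, ly), (p.1, p.2), (p.1, 0)]) := by
        simp [fixStepA, h2]
      simp only [List.foldl_cons, hstep]
      rw [ih p.1 p.2]
      simp [emit, h]

-- the running (px,py) of pass 2 is the last corner
lemma quad_state (cs : List (Int × Int)) : ∀ (s0 : Int × Int × List (Int × Int)) (q : Int × Int),
    cs.getLast? = some q →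
    ((cs.foldl quadStep s0).1, (cs.foldl quadStep s0).2.1) = (q.1, q.2) := by
  induction cs with
  | nil => intro s0 q h; simp at h
  | cons c cs ih =>
    intro s0 q h
    cases cs with
    | nil => simp at h; simp [quadStep, h]
    | cons c' cs' =>
      rw [List.getLast?_cons_cons] at h
      simpa [List.foldl_cons] using ih (quadStep s0 c) q h

-- B's corner loop followed by pass 2 computes `emit` from a non-empty corner list
lemma B_loop (ps : List (Int × Int)) : ∀ (c0 : Int × Int) (rest : List (Int × Int)) (q : Int × Int),
    (c0 :: rest).getLast? = some q →
    pass2 (ps.foldl cornerStep (c0 :: rest))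
    = ((c0 :: rest).foldl quadStep (c0.1, c0.2, [])).2.2 ++ emit ps q.1 q.2 := by
  induction ps with
  | nil =>
    intro c0 rest q h
    have hs := quad_state (c0 :: rest) (c0.1, c0.2, []) q h
    have h1 : ((c0 :: rest).foldl quadStep (c0.1, c0.2, [])).1 = q.1 :=
      congrArg Prod.fst hs
    have h2 : ((c0 :: rest).foldl quadStep (c0.1, c0.2, [])).2.1 = q.2 :=
      congrArg Prod.snd hs
    show (let st := (c0 :: rest).foldl quadStep (c0.1, c0.2, [])
          st.2.2 ++ [(st.1, 0), (st.1, st.2.1), (1200, st.2.1), (1200, 0)]) = _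
    simp only [emit, h1, h2]
  | cons p ps ih =>
    intro c0 rest q h
    by_cases hy : p.2 = q.2
    · have hc : cornerStep (c0 :: rest) p = c0 :: rest := by
        simp [cornerStep, h, hy]
      simp only [List.foldl_cons, hc]
      rw [ih c0 rest q h]
      simp [emit, hy]
    · have hc : cornerStep (c0 :: rest) p = (c0 :: rest) ++ [(p.1, p.2)] := by
        simp [cornerStep, h, Ne.symm hy]
      have h' : ((c0 :: rest) ++ [(p.1, p.2)]).getLast? = some (p.1, p.2) :=
        List.getLast?_concat
      have hrw : (c0 :: rest) ++ [(p.1, p.2)] = c0 :: (rest ++ [(p.1, p.2)]) := rfl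
      simp only [List.foldl_cons, hc, hrw]
      rw [ih c0 (rest ++ [(p.1, p.2)]) (p.1, p.2) (by rw [← hrw]; exact h')]
      rw [← hrw, List.foldl_append]
      have hs := quad_state (c0 :: rest) (c0.1, c0.2, []) q h
      have h1 : ((c0 :: rest).foldl quadStep (c0.1, c0.2, [])).1 = q.1 :=
        congrArg Prod.fst hs
      have h2 : ((c0 :: rest).foldl quadStep (c0.1, c0.2, [])).2.1 = q.2 :=
        congrArg Prod.snd hs
      show (quadStep _ (p.1, p.2)).2.2 ++ _ = _
      simp only [quadStep, h1, h2, emit]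
      rw [if_pos hy]
      rw [show List.foldl quadStep (c0.1, c0.2, ([] : List (Int × Int)))
            (c0 :: rest)
          = List.foldl quadStep
              (c0.1, c0.2, [] ++ [(c0.1, 0), (c0.1, c0.2), (c0.1, c0.2), (c0.1, 0)]) rest
          from by rw [List.foldl_cons]; rfl]
      simp [List.append_assoc]

-- ===== VERDICT (by name: the statement is the Claim_ definition above) =====
theorem fix_points_spec : Claim_equal_fix_points := by
  intro points _ hpre
  unfold Spec_fix_points
  match points with
  | [] => exact absurd rfl hpre
  | p :: ps =>
    have hA : fixStepA (none, none, []) p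
        = (some p.2, some p.1, [(p.1, 0), (p.1, p.2), (p.1, p.2), (p.1, 0)]) := by
      simp [fixStepA]
    have hB : cornerStep [] p = [(p.1, p.2)] := by simp [cornerStep]
    show fix_points (p :: ps) = fix_points_alt (p :: ps)
    rw [alt_eq]
    unfold fix_points
    simp only [List.foldl_cons, hA, hB]
    rw [A_loop ps p.1 p.2]
    rw [B_loop ps (p.1, p.2) [] (p.1, p.2) (by simp)]
    simp [quadStep]
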